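-- pv_equiv track=rewrite | github.com/afine907/jojo-code | src/nano_code/cli/keybindings.py | format_keybinding
-- ===== SOURCE A (Python) =====
-- def format_keybinding(key: str) -> str:
--     """格式化快捷键显示
--
--     Args:
--         key: 快捷键
--
--     Returns:
--         格式化的字符串
--     """
--     key = key.lower()
--     replacements = {
--         "ctrl": "^",
--         "shift": "Shift+",
--         "alt": "Alt+",
--     }
--
--     result = key
--     for old, new in replacements.items():
--         if result.startswith(old + "+"):
--             result = new + result[len(old) + 1 :]
--         result = result.replace(old + "+", new)
--
--     return result
-- ===== SOURCE B (Python) =====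
-- def format_keybinding(key: str) -> str:
--     """Format keyboard shortcut for display (single left-to-right scan)."""
--     key = key.lower()
--     out = []
--     i = 0
--     n = len(key)
--     while i < n:
--         if key.startswith("ctrl+", i):
--             out.append("^")
--             i += 5
--         elif key.startswith("shift+", i):
--             out.append("Shift+")
--             i += 6
--         elif key.startswith("alt+", i):
--             out.append("Alt+")
--             i += 4
--         else:
--             out.append(key[i])
--             i += 1
--     return "".join(out)
-- ===== Notes on version B (the rewrite author's own statement) =====
-- stated objective: alternative
-- what changed: A lowercases and then makes three sequential full-string str.replace passes (each preceded by a redundant startswith prefix branch); B makes one left-to-right scan that matches ctrl+/shift+/alt+ at each position and emits the replacement or the character.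
import Mathlib
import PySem

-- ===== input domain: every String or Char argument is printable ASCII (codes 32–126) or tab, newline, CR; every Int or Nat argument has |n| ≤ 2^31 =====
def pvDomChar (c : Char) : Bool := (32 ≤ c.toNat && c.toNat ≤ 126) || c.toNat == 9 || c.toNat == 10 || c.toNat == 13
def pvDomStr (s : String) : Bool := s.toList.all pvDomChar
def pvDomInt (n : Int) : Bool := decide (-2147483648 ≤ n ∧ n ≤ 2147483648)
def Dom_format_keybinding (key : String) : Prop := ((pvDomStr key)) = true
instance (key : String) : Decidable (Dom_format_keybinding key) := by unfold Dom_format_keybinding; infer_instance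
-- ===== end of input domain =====

-- B replaces A's three sequential full-string `replace` passes (plus a redundant startswith
-- prefix branch) by ONE left-to-right scan that matches the three patterns position by
-- position; objective: alternative (single pass instead of three passes).

-- ===== PORT A =====
def format_keybinding (key : String) : String :=
  let key := PySem.Str.lower key
  let replacements : List (String × String) := [("ctrl", "^"), ("shift", "Shift+"), ("alt", "Alt+")]
  replacements.foldl (fun result p =>
    let result := if PySem.Str.startswith result (p.1 ++ "+")
      then p.2 ++ PySem.Str.slice result (some (PySem.Str.len p.1 + 1)) none
      else result
    PySem.Str.replace result (p.1 ++ "+") p.2) key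

-- ===== PORT B =====
-- B's while-loop over index i, appending one piece per step; ported as structural recursion
-- on the remaining suffix of the char list (key.startswith(pat, i) = pat.isPrefixOf (drop i)).
def fkScan : List Char → List Char
  | [] => []
  | c :: t =>
    if ['c','t','r','l','+'].isPrefixOf (c :: t) then
      '^' :: fkScan ((c :: t).drop 5)
    else if ['s','h','i','f','t','+'].isPrefixOf (c :: t) then
      'S' :: 'h' :: 'i' :: 'f' :: 't' :: '+' :: fkScan ((c :: t).drop 6)
    else if ['a','l','t','+'].isPrefixOf (c :: t) then
      'A' :: 'l' :: 't' :: '+' :: fkScan ((c :: t).drop 4)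
    else
      c :: fkScan t
  termination_by l => l.length
  decreasing_by all_goals (simp; try omega)

def format_keybinding_alt (key : String) : String :=
  String.ofList (fkScan (PySem.Str.lower key).toList)


-- ===== PRECONDITION & SPEC =====
def Spec_format_keybinding (key : String) (out : String) : Prop := out = format_keybinding_alt key
instance (key : String) (out : String) : Decidable (Spec_format_keybinding key out) := by unfold Spec_format_keybinding; infer_instance

-- ===== CLAIM (what is proved, stated in full; the proofs are below) =====
def Claim_equal_format_keybinding : Prop := ∀ (key : String), Dom_format_keybinding key → Spec_format_keybinding key (format_keybinding key)

-- ===== LEMMAS AND PROOFS =====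

-- `repl o old' nw l` = Python's l.replace(o :: old', nw) in structural form (nonempty pattern).
def repl (o : Char) (old' nw : List Char) : List Char → List Char
  | [] => []
  | c :: t =>
    if (o :: old').isPrefixOf (c :: t) then nw ++ repl o old' nw (t.drop old'.length)
    else c :: repl o old' nw t
  termination_by l => l.length
  decreasing_by all_goals (simp; try omega)

lemma go_eq_repl (o : Char) (old' nw : List Char) :
    ∀ (fuel : Nat) (l acc : List Char), l.length ≤ fuel →
      PySem.Chars.replace.go (o :: old') nw fuel l acc = acc.reverse ++ repl o old' nw l := by
  intro fuel
  induction fuel with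
  | zero =>
    intro l acc h
    have : l = [] := by cases l <;> simp_all
    subst this
    simp [PySem.Chars.replace.go, repl]
  | succ n ih =>
    intro l acc h
    cases l with
    | nil => simp [PySem.Chars.replace.go, repl]
    | cons c t =>
      rw [PySem.Chars.replace.go]
      by_cases hp : (o :: old').isPrefixOf (c :: t)
      · rw [if_pos hp, repl, if_pos hp]
        have hlen : (List.drop (o :: old').length (c :: t)).length ≤ n := by
          simp at h ⊢; omega
        rw [ih _ _ hlen]
        simp
      · rw [if_neg hp, repl, if_neg hp]
        have hlen : t.length ≤ n := by simp at h; omega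
        rw [ih _ _ hlen]
        simp

lemma replace_eq_repl (o : Char) (old' nw l : List Char) :
    PySem.Chars.replace l (o :: old') nw = repl o old' nw l := by
  rw [PySem.Chars.replace]
  simp [go_eq_repl o old' nw l.length l [] le_rfl]

lemma repl_match (o : Char) (old' nw : List Char) {c : Char} {t : List Char}
    (h : (o :: old').isPrefixOf (c :: t)) :
    repl o old' nw (c :: t) = nw ++ repl o old' nw (t.drop old'.length) := by
  rw [repl, if_pos h]

lemma repl_nomatch (o : Char) (old' nw : List Char) {c : Char} {t : List Char}
    (h : ¬ (o :: old').isPrefixOf (c :: t) = true) :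
    repl o old' nw (c :: t) = c :: repl o old' nw t := by
  rw [repl, if_neg h]

-- a replacement text starting with a char n0 absent from q cannot create a new occurrence of
-- the prefix q, so a prefix of the replaced string pulls back to a prefix of the original
lemma repl_prefix_rev (o n0 : Char) (old' nw' : List Char) :
    ∀ (n : Nat) (t q : List Char), t.length ≤ n → n0 ∉ q →
      q.isPrefixOf (repl o old' (n0 :: nw') t) = true → q.isPrefixOf t = true := by
  intro n
  induction n with
  | zero =>
    intro t q ht _ hq
    have : t = [] := by cases t <;> simp_all
    subst this
    simpa [repl] using hq
  | succ n ih =>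
    intro t q ht hn hq
    cases t with
    | nil => simpa [repl] using hq
    | cons c t' =>
      cases q with
      | nil => simp
      | cons a q' =>
        by_cases hp : (o :: old').isPrefixOf (c :: t')
        · rw [repl_match o old' _ hp, List.cons_append] at hq
          simp only [List.isPrefixOf] at hq
          have ha : a = n0 := by
            rcases Bool.and_eq_true_iff.mp hq with ⟨h1, _⟩
            exact eq_of_beq h1
          exact absurd (ha ▸ List.mem_cons_self) hn
        · rw [repl_nomatch o old' _ hp] at hq
          simp only [List.isPrefixOf] at hq ⊢
          rcases Bool.and_eq_true_iff.mp hq with ⟨h1, h2⟩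
          refine Bool.and_eq_true_iff.mpr ⟨h1, ?_⟩
          exact ih t' q' (by simp at ht; omega) (fun hm => hn (List.mem_cons_of_mem _ hm)) h2

-- the three sequential replace passes of A equal B's single scan
lemma chain_eq_scan :
    ∀ (n : Nat) (l : List Char), l.length ≤ n →
      repl 'a' ['l','t','+'] ['A','l','t','+']
        (repl 's' ['h','i','f','t','+'] ['S','h','i','f','t','+']
          (repl 'c' ['t','r','l','+'] ['^'] l)) = fkScan l := by
  intro n
  induction n with
  | zero =>
    intro l h
    have : l = [] := by cases l <;> simp_all
    subst this
    simp [repl, fkScan]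
  | succ n ih =>
    intro l h
    cases l with
    | nil => simp [repl, fkScan]
    | cons c t =>
      by_cases hc : ['c','t','r','l','+'].isPrefixOf (c :: t) = true
      · obtain ⟨r, hr⟩ := List.isPrefixOf_iff_prefix.mp hc
        obtain ⟨rfl, rfl⟩ : 'c' = c ∧ ['t','r','l','+'] ++ r = t := by
          constructor <;> [exact (List.cons_eq_cons.mp hr).1; exact (List.cons_eq_cons.mp hr).2]
        simp only [List.cons_append, List.nil_append] at *
        simp [repl, fkScan, List.isPrefixOf]
        exact ih r (by simp at h; omega)
      · by_cases hs : ['s','h','i','f','t','+'].isPrefixOf (c :: t) = true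
        · obtain ⟨r, hr⟩ := List.isPrefixOf_iff_prefix.mp hs
          obtain ⟨rfl, rfl⟩ : 's' = c ∧ ['h','i','f','t','+'] ++ r = t := by
            constructor <;> [exact (List.cons_eq_cons.mp hr).1; exact (List.cons_eq_cons.mp hr).2]
          simp only [List.cons_append, List.nil_append] at *
          simp [repl, fkScan, List.isPrefixOf]
          exact ih r (by simp at h; omega)
        · by_cases ha : ['a','l','t','+'].isPrefixOf (c :: t) = true
          · obtain ⟨r, hr⟩ := List.isPrefixOf_iff_prefix.mp ha
            obtain ⟨rfl, rfl⟩ : 'a' = c ∧ ['l','t','+'] ++ r = t := by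
              constructor <;> [exact (List.cons_eq_cons.mp hr).1; exact (List.cons_eq_cons.mp hr).2]
            simp only [List.cons_append, List.nil_append] at *
            simp [repl, fkScan, List.isPrefixOf]
            exact ih r (by simp at h; omega)
          · have e1 : repl 'c' ['t','r','l','+'] ['^'] (c :: t)
                = c :: repl 'c' ['t','r','l','+'] ['^'] t := repl_nomatch _ _ _ hc
            have h2 : ¬ ('s' :: ['h','i','f','t','+']).isPrefixOf
                (c :: repl 'c' ['t','r','l','+'] ['^'] t) = true := by
              intro hpre
              simp only [List.isPrefixOf] at hpre
              rcases Bool.and_eq_true_iff.mp hpre with ⟨hb, htail⟩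
              have hct : (['h','i','f','t','+'] : List Char).isPrefixOf t = true :=
                repl_prefix_rev 'c' '^' _ [] t.length t _ le_rfl (by decide) htail
              apply hs
              simp only [List.isPrefixOf]
              exact Bool.and_eq_true_iff.mpr ⟨hb, hct⟩
            have h3 : ¬ ('a' :: ['l','t','+']).isPrefixOf
                (c :: repl 's' ['h','i','f','t','+'] ['S','h','i','f','t','+']
                  (repl 'c' ['t','r','l','+'] ['^'] t)) = true := by
              intro hpre
              simp only [List.isPrefixOf] at hpre
              rcases Bool.and_eq_true_iff.mp hpre with ⟨hb, htail⟩
              have hs1 : (['l','t','+'] : List Char).isPrefixOf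
                  (repl 'c' ['t','r','l','+'] ['^'] t) = true :=
                repl_prefix_rev 's' 'S' _ ['h','i','f','t','+'] _ _ _ le_rfl (by decide) htail
              have hs2 : (['l','t','+'] : List Char).isPrefixOf t = true :=
                repl_prefix_rev 'c' '^' _ [] _ _ _ le_rfl (by decide) hs1
              apply ha
              simp only [List.isPrefixOf]
              exact Bool.and_eq_true_iff.mpr ⟨hb, hs2⟩
            rw [e1, repl_nomatch _ _ _ h2, repl_nomatch _ _ _ h3, fkScan,
              if_neg hc, if_neg hs, if_neg ha]
            exact congrArg (c :: ·) (ih t (by simp at h; omega))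

-- one iteration of A's loop (prefix branch + replace) is the plain replace, in `repl` form
lemma stepStr_ctrl (s : String) :
    PySem.Str.replace
      (if PySem.Str.startswith s ("ctrl" ++ "+") = true
        then "^" ++ PySem.Str.slice s (some (PySem.Str.len "ctrl" + 1)) none else s)
      ("ctrl" ++ "+") "^"
    = String.ofList (repl 'c' ['t','r','l','+'] ['^'] s.toList) := by
  have hpat : ("ctrl" ++ "+").toList = ['c','t','r','l','+'] := by decide
  by_cases h : PySem.Str.startswith s ("ctrl" ++ "+") = true
  · rw [if_pos h]
    have hpre : (['c','t','r','l','+'] : List Char).isPrefixOf s.toList = true := by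
      simpa [PySem.Str.startswith, PySem.Chars.startswith, hpat] using h
    obtain ⟨r, hr⟩ := List.isPrefixOf_iff_prefix.mp hpre
    apply String.ext
    simp only [PySem.Str.replace, String.toList_ofList, String.toList_append,
      PySem.Str.slice, PySem.Chars.slice_eq_listSlice, hpat]
    rw [PySem.List.slice_from _ (by simp [PySem.Str.len])]
    have h5 : (PySem.Str.len "ctrl" + 1 : Int).toNat = 5 := by decide
    rw [h5, replace_eq_repl, show ("^" : String).toList = ['^'] from by decide, ← hr]
    simp [repl, List.isPrefixOf, List.cons_append]
  · rw [if_neg h]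
    apply String.ext
    simp only [PySem.Str.replace, String.toList_ofList, hpat]
    rw [replace_eq_repl, show ("^" : String).toList = ['^'] from by decide]

lemma stepStr_shift (s : String) :
    PySem.Str.replace
      (if PySem.Str.startswith s ("shift" ++ "+") = true
        then "Shift+" ++ PySem.Str.slice s (some (PySem.Str.len "shift" + 1)) none else s)
      ("shift" ++ "+") "Shift+"
    = String.ofList (repl 's' ['h','i','f','t','+'] ['S','h','i','f','t','+'] s.toList) := by
  have hpat : ("shift" ++ "+").toList = ['s','h','i','f','t','+'] := by decide
  by_cases h : PySem.Str.startswith s ("shift" ++ "+") = true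
  · rw [if_pos h]
    have hpre : (['s','h','i','f','t','+'] : List Char).isPrefixOf s.toList = true := by
      simpa [PySem.Str.startswith, PySem.Chars.startswith, hpat] using h
    obtain ⟨r, hr⟩ := List.isPrefixOf_iff_prefix.mp hpre
    apply String.ext
    simp only [PySem.Str.replace, String.toList_ofList, String.toList_append,
      PySem.Str.slice, PySem.Chars.slice_eq_listSlice, hpat]
    rw [PySem.List.slice_from _ (by simp [PySem.Str.len])]
    have h6 : (PySem.Str.len "shift" + 1 : Int).toNat = 6 := by decide
    rw [h6, replace_eq_repl, show ("Shift+" : String).toList = ['S','h','i','f','t','+'] from by decide, ← hr]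
    simp [repl, List.isPrefixOf, List.cons_append]
  · rw [if_neg h]
    apply String.ext
    simp only [PySem.Str.replace, String.toList_ofList, hpat]
    rw [replace_eq_repl, show ("Shift+" : String).toList = ['S','h','i','f','t','+'] from by decide]

lemma stepStr_alt (s : String) :
    PySem.Str.replace
      (if PySem.Str.startswith s ("alt" ++ "+") = true
        then "Alt+" ++ PySem.Str.slice s (some (PySem.Str.len "alt" + 1)) none else s)
      ("alt" ++ "+") "Alt+"
    = String.ofList (repl 'a' ['l','t','+'] ['A','l','t','+'] s.toList) := by
  have hpat : ("alt" ++ "+").toList = ['a','l','t','+'] := by decide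
  by_cases h : PySem.Str.startswith s ("alt" ++ "+") = true
  · rw [if_pos h]
    have hpre : (['a','l','t','+'] : List Char).isPrefixOf s.toList = true := by
      simpa [PySem.Str.startswith, PySem.Chars.startswith, hpat] using h
    obtain ⟨r, hr⟩ := List.isPrefixOf_iff_prefix.mp hpre
    apply String.ext
    simp only [PySem.Str.replace, String.toList_ofList, String.toList_append,
      PySem.Str.slice, PySem.Chars.slice_eq_listSlice, hpat]
    rw [PySem.List.slice_from _ (by simp [PySem.Str.len])]
    have h4 : (PySem.Str.len "alt" + 1 : Int).toNat = 4 := by decide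
    rw [h4, replace_eq_repl, show ("Alt+" : String).toList = ['A','l','t','+'] from by decide, ← hr]
    simp [repl, List.isPrefixOf, List.cons_append]
  · rw [if_neg h]
    apply String.ext
    simp only [PySem.Str.replace, String.toList_ofList, hpat]
    rw [replace_eq_repl, show ("Alt+" : String).toList = ['A','l','t','+'] from by decide]

-- ===== VERDICT (by name: the statement is the Claim_ definition above) =====
theorem format_keybinding_spec : Claim_equal_format_keybinding := by
  intro key _
  unfold Spec_format_keybinding format_keybinding format_keybinding_alt
  simp only [List.foldl]
  rw [stepStr_ctrl, stepStr_shift, stepStr_alt]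
  rw [String.toList_ofList, String.toList_ofList]
  rw [chain_eq_scan _ _ le_rfl]
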